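-- pv_equiv track=rewrite | github.com/achousal/SecondBrainR | _code/src/engram_r/daemon_scheduler.py | _is_literature_stub
-- ===== SOURCE A (Python) =====
-- def _is_literature_stub(text: str) -> bool:
--     """Return True if text lacks populated Key Points and Relevance sections."""
--     has_key_points = False
--     has_relevance = False
--     lines = text.splitlines()
--     current_section = ""
--     for line in lines:
--         stripped = line.strip()
--         if stripped.startswith("## Key Points"):
--             current_section = "key_points"
--             continue
--         elif stripped.startswith("## Relevance"):
--             current_section = "relevance"
--             continue
--         elif stripped.startswith("## "):
--             current_section = ""
--             continue
--         is_content = stripped and not stripped.startswith("---")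
--         if current_section == "key_points" and is_content:
--             has_key_points = True
--         if current_section == "relevance" and is_content:
--             has_relevance = True
--     return not (has_key_points and has_relevance)
-- ===== SOURCE B (Python) =====
-- def _is_literature_stub(text: str) -> bool:
--     """Parse the text into (header, body) blocks first, then query the blocks."""
--     lines = [line.strip() for line in text.splitlines()]
--
--     def blocks(ls):
--         if not ls:
--             return []
--         if not ls[0].startswith("## "):
--             return blocks(ls[1:])
--         body = []
--         rest = ls[1:]
--         while rest and not rest[0].startswith("## "):
--             body.append(rest[0])
--             rest = rest[1:]
--         return [(ls[0], body)] + blocks(rest)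
--
--     bs = blocks(lines)
--
--     def populated(prefix):
--         return any(h.startswith(prefix) and any(s and not s.startswith("---") for s in b)
--                    for h, b in bs)
--
--     return not (populated("## Key Points") and populated("## Relevance"))
-- ===== Notes on version B (the rewrite author's own statement) =====
-- stated objective: alternative
-- what changed: B first parses the stripped lines into a list of (header, body-lines) blocks and then answers with two independent queries over that structure, instead of A's single-pass state machine that threads two boolean flags and a current-section variable through every line.
import Mathlib
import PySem

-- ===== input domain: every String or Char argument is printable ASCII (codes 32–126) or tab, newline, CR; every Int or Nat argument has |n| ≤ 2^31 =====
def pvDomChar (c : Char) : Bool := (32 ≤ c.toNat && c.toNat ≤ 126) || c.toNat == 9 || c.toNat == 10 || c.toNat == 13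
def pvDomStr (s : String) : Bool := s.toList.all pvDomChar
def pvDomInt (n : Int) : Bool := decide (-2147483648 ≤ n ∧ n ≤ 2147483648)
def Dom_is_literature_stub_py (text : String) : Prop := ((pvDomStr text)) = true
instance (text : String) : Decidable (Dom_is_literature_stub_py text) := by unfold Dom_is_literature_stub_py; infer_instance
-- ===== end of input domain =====

-- B first parses the text into (header, body) blocks and then answers with two queries
-- over that structure, instead of A's per-line boolean-flag state machine (objective: alternative).

-- ===== PORT A =====
-- A's loop body on the already-stripped line (branches in A's order)
def pvACore (st : Bool × Bool × String) (stripped : String) : Bool × Bool × String :=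
  if PySem.Str.startswith stripped "## Key Points" then (st.1, st.2.1, "key_points")
  else if PySem.Str.startswith stripped "## Relevance" then (st.1, st.2.1, "relevance")
  else if PySem.Str.startswith stripped "## " then (st.1, st.2.1, "")
  else
    let isContent := decide (stripped ≠ "") && !(PySem.Str.startswith stripped "---")
    ((if st.2.2 == "key_points" && isContent then true else st.1),
     (if st.2.2 == "relevance" && isContent then true else st.2.1),
     st.2.2)

def is_literature_stub_py (text : String) : Bool :=
  let st := (PySem.Str.splitlines text).foldl
    (fun st line => pvACore st (PySem.Str.strip line)) (false, false, "")
  !(st.1 && st.2.1)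

-- ===== PORT B =====
def pvHeader (s : String) : Bool := PySem.Str.startswith s "## "
def pvContent (s : String) : Bool := decide (s ≠ "") && !(PySem.Str.startswith s "---")

-- Source B's `blocks`: the inner while-loop is the takeWhile/dropWhile split of `rest`
def pvBlocks : List String → List (String × List String)
  | [] => []
  | l :: r =>
    if pvHeader l then
      (l, r.takeWhile (fun s => !(pvHeader s))) :: pvBlocks (r.dropWhile (fun s => !(pvHeader s)))
    else pvBlocks r
termination_by ls => ls.length
decreasing_by
  · exact Nat.lt_succ_of_le (List.length_dropWhile_le _ _)
  · simp

-- Source B's `populated(prefix)` over the precomputed blocks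
def pvPopulated (bs : List (String × List String)) (pfx : String) : Bool :=
  bs.any fun hb => PySem.Str.startswith hb.1 pfx && hb.2.any pvContent

def is_literature_stub_py_alt (text : String) : Bool :=
  let lines := (PySem.Str.splitlines text).map PySem.Str.strip
  let bs := pvBlocks lines
  !(pvPopulated bs "## Key Points" && pvPopulated bs "## Relevance")

-- ===== PRECONDITION & SPEC =====
def Spec_is_literature_stub_py (text : String) (out : Bool) : Prop := out = is_literature_stub_py_alt text
instance (text : String) (out : Bool) : Decidable (Spec_is_literature_stub_py text out) := by unfold Spec_is_literature_stub_py; infer_instance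

-- ===== CLAIM (what is proved, stated in full; the proofs are below) =====
def Claim_equal_is_literature_stub_py : Prop := ∀ (text : String), Dom_is_literature_stub_py text → Spec_is_literature_stub_py text (is_literature_stub_py text)

-- ===== LEMMAS AND PROOFS =====

-- content of the segment before the first header
def pvHeadContent (ls : List String) : Bool := (ls.takeWhile (fun s => !(pvHeader s))).any pvContent

-- a line starting with a prefix that extends "## " is a header
theorem pv_header_of (l : String) (p : List Char)
    (hp : PySem.Chars.startswith l.toList p = true) (hpre : ("## ".toList) <+: p) :
    pvHeader l = true := by
  unfold pvHeader
  rw [PySem.Str.startswith_eq, PySem.Chars.startswith_iff]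
  rw [PySem.Chars.startswith_iff] at hp
  exact hpre.trans hp

-- a line cannot start with both "## Key Points" and "## Relevance"
theorem pv_kp_not_rel (l : List Char)
    (hk : PySem.Chars.startswith l ("## Key Points".toList) = true) :
    PySem.Chars.startswith l ("## Relevance".toList) = false := by
  by_contra h
  rw [Bool.not_eq_false] at h
  rw [PySem.Chars.startswith_iff] at hk h
  rcases List.prefix_or_prefix_of_prefix h hk with h' | h' <;> revert h' <;> decide

-- blocks skips non-header heads
theorem pvBlocks_dropWhile (ls : List String) :
    pvBlocks (ls.dropWhile (fun s => !(pvHeader s))) = pvBlocks ls := by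
  induction ls with
  | nil => rfl
  | cons l r ih =>
    by_cases hl : pvHeader l = true
    · simp [hl]
    · have hl' : pvHeader l = false := by simpa using hl
      rw [List.dropWhile_cons]
      simp only [hl', Bool.not_false, if_pos]
      rw [ih]
      conv_rhs => rw [pvBlocks]
      simp [hl']

-- main invariant: A's fold result expressed through B's block structure
theorem pv_main (ls : List String) (kp rel : Bool) (sec : String) :
    (ls.foldl pvACore (kp, rel, sec)).1 =
      (kp || ((sec == "key_points") && pvHeadContent ls) || pvPopulated (pvBlocks ls) "## Key Points") ∧
    (ls.foldl pvACore (kp, rel, sec)).2.1 =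
      (rel || ((sec == "relevance") && pvHeadContent ls) || pvPopulated (pvBlocks ls) "## Relevance") := by
  induction ls generalizing kp rel sec with
  | nil => simp [pvHeadContent, pvPopulated, pvBlocks]
  | cons l r ih =>
    simp only [List.foldl_cons]
    by_cases hk : PySem.Chars.startswith l.toList ("## Key Points".toList) = true
    · have hh : pvHeader l = true := pv_header_of _ _ hk (by decide)
      have hr : PySem.Chars.startswith l.toList ("## Relevance".toList) = false :=
        pv_kp_not_rel _ hk
      simp at hk hr
      have e : pvBlocks (l :: r) =
          (l, r.takeWhile (fun s => !(pvHeader s))) :: pvBlocks r := by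
        rw [pvBlocks]; simp [hh, pvBlocks_dropWhile]
      rw [show pvACore (kp, rel, sec) l = (kp, rel, "key_points") by
        simp [pvACore, hk]]
      obtain ⟨e1, e2⟩ := ih kp rel "key_points"
      refine ⟨?_, ?_⟩
      · rw [e1, e]
        simp [pvPopulated, pvHeadContent, hh, hk, Bool.or_assoc]
      · rw [e2, e]
        simp [pvPopulated, pvHeadContent, hh, hr]
    · have hk' : PySem.Chars.startswith l.toList ("## Key Points".toList) = false := by
        simpa using hk
      by_cases hr : PySem.Chars.startswith l.toList ("## Relevance".toList) = true
      · have hh : pvHeader l = true := pv_header_of _ _ hr (by decide)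
        simp at hk' hr
        have e : pvBlocks (l :: r) =
            (l, r.takeWhile (fun s => !(pvHeader s))) :: pvBlocks r := by
          rw [pvBlocks]; simp [hh, pvBlocks_dropWhile]
        rw [show pvACore (kp, rel, sec) l = (kp, rel, "relevance") by
          simp [pvACore, hk', hr]]
        obtain ⟨e1, e2⟩ := ih kp rel "relevance"
        refine ⟨?_, ?_⟩
        · rw [e1, e]
          simp [pvPopulated, pvHeadContent, hh, hk']
        · rw [e2, e]
          simp [pvPopulated, pvHeadContent, hh, hr, Bool.or_assoc]
      · have hr' : PySem.Chars.startswith l.toList ("## Relevance".toList) = false := by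
          simpa using hr
        by_cases hh : pvHeader l = true
        · simp at hk' hr'
          have hsw : PySem.Chars.startswith l.toList ("## ".toList) = true := by
            have := hh; unfold pvHeader at this; simpa using this
          simp at hsw
          have e : pvBlocks (l :: r) =
              (l, r.takeWhile (fun s => !(pvHeader s))) :: pvBlocks r := by
            rw [pvBlocks]; simp [hh, pvBlocks_dropWhile]
          rw [show pvACore (kp, rel, sec) l = (kp, rel, "") by
            simp [pvACore, hk', hr', hsw]]
          obtain ⟨e1, e2⟩ := ih kp rel ""
          refine ⟨?_, ?_⟩
          · rw [e1, e]
            simp [pvPopulated, pvHeadContent, hh, hk']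
          · rw [e2, e]
            simp [pvPopulated, pvHeadContent, hh, hr']
        · have hh' : pvHeader l = false := by simpa using hh
          simp at hk' hr'
          have hsw : PySem.Chars.startswith l.toList ("## ".toList) = false := by
            have := hh'; unfold pvHeader at this; simpa using this
          simp at hsw
          have e : pvBlocks (l :: r) = pvBlocks r := by
            rw [pvBlocks]; simp [hh']
          have estep : pvACore (kp, rel, sec) l =
              ((if (sec == "key_points") && pvContent l then true else kp),
               (if (sec == "relevance") && pvContent l then true else rel), sec) := by
            simp [pvACore, hk', hr', hsw, pvContent]
          rw [estep]
          obtain ⟨e1, e2⟩ := ih (if (sec == "key_points") && pvContent l then true else kp)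
            (if (sec == "relevance") && pvContent l then true else rel) sec
          have ehc : pvHeadContent (l :: r) = (pvContent l || pvHeadContent r) := by
            simp [pvHeadContent, hh']
          refine ⟨?_, ?_⟩
          · rw [e1, e, ehc]
            cases kp <;> cases (sec == "key_points") <;> cases pvContent l <;> simp
          · rw [e2, e, ehc]
            cases rel <;> cases (sec == "relevance") <;> cases pvContent l <;> simp

-- ===== VERDICT (by name: the statement is the Claim_ definition above) =====
theorem is_literature_stub_py_spec : Claim_equal_is_literature_stub_py := by
  intro text _
  unfold Spec_is_literature_stub_py is_literature_stub_py is_literature_stub_py_alt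
  have hm : (PySem.Str.splitlines text).foldl
      (fun st line => pvACore st (PySem.Str.strip line)) (false, false, "") =
      ((PySem.Str.splitlines text).map PySem.Str.strip).foldl pvACore (false, false, "") := by
    rw [List.foldl_map]
  obtain ⟨e1, e2⟩ := pv_main ((PySem.Str.splitlines text).map PySem.Str.strip) false false ""
  simp only [hm, e1, e2]
  simp
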